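-- pv_equiv track=rewrite | github.com/bangping/temp | t1.py | get_cand
-- ===== SOURCE A (Python) =====
-- def get_cand(n, arr):
--     cur_m = arr[0]
--     is_increase = None
--     cur_num = 1
--     prev_num = len(arr) + 1
--     cand = 0
--     for r in arr[1:]:
--         if r != cur_m and is_increase is None:
--             is_increase = (r > cur_m)
--             cur_num += 1
--             cur_m = r
--         elif r != cur_m and is_increase == (r > cur_m):
--             cur_num += 1
--             cur_m = r
--         else:
--             cand += int((cur_num + 1) * cur_num / 2)
--             if prev_num <= cur_num:
--                 cand += cur_num - prev_num + 1
--             prev_num = cur_num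
--             cur_num = 1
--             cur_m = r
--             is_increase = None
--     cand += int((cur_num + 1) * cur_num / 2)
--     if prev_num <= cur_num:
--         cand += cur_num - prev_num + 1
--     return cand
-- ===== SOURCE B (Python) =====
-- def get_cand(n, arr):
--     # Per-element DP: each element adds its position within its monotone run
--     # (summing 1+2+...+L across the run), plus a unit bonus once that position
--     # reaches the previous run's length; no per-run closed form needed.
--     total = 0
--     pos = 0
--     direction = 0
--     prevlen = len(arr) + 1
--     prev = None
--     for x in arr:
--         if prev is None:
--             pos, direction = 1, 0
--         else:
--             d = 0 if x == prev else (1 if x > prev else -1)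
--             if d != 0 and (direction == 0 or direction == d):
--                 pos += 1
--                 direction = d
--             else:
--                 prevlen, pos, direction = pos, 1, 0
--         total += pos
--         if pos >= prevlen:
--             total += 1
--         prev = x
--     return total
-- ===== Notes on version B (the rewrite author's own statement) =====
-- stated objective: alternative
-- what changed: Replaces A's per-run counting (closed-form triangle number plus boundary bonus computed only when a run closes) with a per-element DP that adds each element's position within its monotone run and a unit bonus whenever that position reaches the previous run's length, so no division or run-total arithmetic is ever performed.
import Mathlib
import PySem

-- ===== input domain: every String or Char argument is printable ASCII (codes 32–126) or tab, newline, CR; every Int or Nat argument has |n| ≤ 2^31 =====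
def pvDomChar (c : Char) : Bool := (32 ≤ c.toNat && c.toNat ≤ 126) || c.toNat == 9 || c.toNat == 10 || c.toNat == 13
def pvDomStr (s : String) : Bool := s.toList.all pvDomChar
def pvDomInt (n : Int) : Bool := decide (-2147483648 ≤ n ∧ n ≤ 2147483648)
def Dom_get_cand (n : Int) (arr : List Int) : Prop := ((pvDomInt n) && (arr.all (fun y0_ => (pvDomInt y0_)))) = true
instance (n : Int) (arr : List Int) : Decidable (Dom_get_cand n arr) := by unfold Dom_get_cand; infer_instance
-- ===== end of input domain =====

-- B replaces A's per-run closed-form counting (triangle number + bonus at each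
-- run boundary) with a per-element DP: each element adds its position within
-- its run plus a unit bonus; objective: alternative decomposition.

-- ===== PORT A =====
-- State: (cur_m, is_increase, cur_num, prev_num, cand); Python's None → Option.none.
-- pvStepA is the loop body, pvFinA the code after the loop.
-- Python's int((cur_num+1)*cur_num/2) is ported as integer division: the product
-- is even and nonnegative, so /2 is exact there.
def pvStepA (st : Int × Option Bool × Int × Int × Int) (r : Int) :
    Int × Option Bool × Int × Int × Int :=
  match st with
  | (cur_m, is_increase, cur_num, prev_num, cand) =>
    if r ≠ cur_m ∧ is_increase = none then
      (r, some (decide (r > cur_m)), cur_num + 1, prev_num, cand)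
    else if r ≠ cur_m ∧ is_increase = some (decide (r > cur_m)) then
      (r, is_increase, cur_num + 1, prev_num, cand)
    else
      (r, none, 1, cur_num,
        cand + (cur_num + 1) * cur_num / 2 +
          (if prev_num ≤ cur_num then cur_num - prev_num + 1 else 0))

def pvFinA (st : Int × Option Bool × Int × Int × Int) : Int :=
  match st with
  | (_, _, cur_num, prev_num, cand) =>
    cand + (cur_num + 1) * cur_num / 2 +
      (if prev_num ≤ cur_num then cur_num - prev_num + 1 else 0)

def get_cand (n : Int) (arr : List Int) : Int :=
  match arr with
  | [] => 0  -- unreachable: Pre_get_cand excludes [] (A raises IndexError on arr[0])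
  | a0 :: rest =>
    pvFinA (rest.foldl pvStepA (a0, none, 1, (arr.length : Int) + 1, 0))

-- ===== PORT B =====
-- Source B's loop body; state (prev, direction, pos, prevlen, total), prev = None → none.
def pvStepB (st : Option Int × Int × Int × Int × Int) (x : Int) :
    Option Int × Int × Int × Int × Int :=
  match st with
  | (none, _direction, _pos, prevlen, total) =>
      -- first element: pos = 1, direction = 0, then total += pos (+ bonus)
      (some x, 0, 1, prevlen, total + 1 + (if (1 : Int) ≥ prevlen then 1 else 0))
  | (some p, direction, pos, prevlen, total) =>
      let d : Int := if x = p then 0 else if x > p then 1 else -1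
      if d ≠ 0 ∧ (direction = 0 ∨ direction = d) then
        (some x, d, pos + 1, prevlen,
          total + (pos + 1) + (if pos + 1 ≥ prevlen then 1 else 0))
      else
        (some x, 0, 1, pos, total + 1 + (if (1 : Int) ≥ pos then 1 else 0))

def get_cand_alt (n : Int) (arr : List Int) : Int :=
  (arr.foldl pvStepB (none, 0, 0, (arr.length : Int) + 1, 0)).2.2.2.2

-- ===== PRECONDITION & SPEC =====
-- Pre_ excludes only the empty list, on which A raises IndexError at arr[0].
def Pre_get_cand (n : Int) (arr : List Int) : Prop := arr ≠ []
instance (n : Int) (arr : List Int) : Decidable (Pre_get_cand n arr) := by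
  unfold Pre_get_cand; infer_instance

def pvWitness_get_cand : Int × List Int := (3, [1, 2, 2])

def Spec_get_cand (n : Int) (arr : List Int) (out : Int) : Prop := out = get_cand_alt n arr
instance (n : Int) (arr : List Int) (out : Int) : Decidable (Spec_get_cand n arr out) := by
  unfold Spec_get_cand; infer_instance

-- ===== CLAIM (what is proved, stated in full; the proofs are below) =====
def Claim_equal_get_cand : Prop := ∀ (n : Int) (arr : List Int), Dom_get_cand n arr → Pre_get_cand n arr → Spec_get_cand n arr (get_cand n arr)

-- ===== LEMMAS AND PROOFS =====

-- encoding of A's is_increase as B's direction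
def pvDir : Option Bool → Int
  | none => 0
  | some true => 1
  | some false => -1

theorem pv_tri_succ (k : Int) : (k + 1) * (k + 2) / 2 = k * (k + 1) / 2 + (k + 1) := by
  have h : (k + 1) * (k + 2) = k * (k + 1) + (k + 1) * 2 := by ring
  rw [h, Int.add_mul_ediv_right _ _ (by norm_num)]

-- Main invariant: finishing A's loop from any mid-run state equals B's fold
-- when B's running total already includes the current run's partial contributions.
theorem pv_main (rest : List Int) : ∀ (cur_m : Int) (inc : Option Bool)
    (cur_num prev_num cand : Int), 1 ≤ cur_num →
    pvFinA (rest.foldl pvStepA (cur_m, inc, cur_num, prev_num, cand)) =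
    (rest.foldl pvStepB (some cur_m, pvDir inc, cur_num, prev_num,
        cand + cur_num * (cur_num + 1) / 2 + (if prev_num ≤ cur_num then cur_num - prev_num + 1 else 0))).2.2.2.2 := by
  induction rest with
  | nil =>
    intro cur_m inc cur_num prev_num cand _
    simp [pvFinA, mul_comm]
  | cons r rest ih =>
    intro cur_m inc cur_num prev_num cand hc
    simp only [List.foldl_cons]
    by_cases hrm : r = cur_m
    · -- equal neighbour: both sides close the current run
      subst hrm
      have h1 := ih r none 1 cur_num
        (cand + (cur_num + 1) * cur_num / 2 + (if prev_num ≤ cur_num then cur_num - prev_num + 1 else 0)) (le_refl 1)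
      simp only [pvDir] at h1
      rw [show pvStepA (r, inc, cur_num, prev_num, cand) r
          = (r, none, 1, cur_num, cand + (cur_num + 1) * cur_num / 2 + (if prev_num ≤ cur_num then cur_num - prev_num + 1 else 0)) from by simp [pvStepA]]
      rw [show pvStepB (some r, pvDir inc, cur_num, prev_num, cand + cur_num * (cur_num + 1) / 2 + (if prev_num ≤ cur_num then cur_num - prev_num + 1 else 0)) r
          = (some r, 0, 1, cur_num, cand + cur_num * (cur_num + 1) / 2 + (if prev_num ≤ cur_num then cur_num - prev_num + 1 else 0) + 1 + (if cur_num ≤ 1 then 1 else 0)) from by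
        simp [pvStepB]]
      rw [h1]
      have et : cand + (cur_num + 1) * cur_num / 2 + (if prev_num ≤ cur_num then cur_num - prev_num + 1 else 0) + 1 * (1 + 1) / 2 + (if cur_num ≤ 1 then 1 - cur_num + 1 else 0)
          = cand + cur_num * (cur_num + 1) / 2 + (if prev_num ≤ cur_num then cur_num - prev_num + 1 else 0) + 1 + (if cur_num ≤ 1 then 1 else 0) := by
        rw [mul_comm (cur_num + 1) cur_num]
        generalize cur_num * (cur_num + 1) / 2 = t
        split_ifs <;> omega
      rw [et]
    · by_cases hgt : r > cur_m
      · -- strictly larger: run extends unless the direction was 'decreasing'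
        cases inc with
        | none =>
          have h1 := ih r (some true) (cur_num + 1) prev_num cand (by omega)
          simp only [pvDir] at h1
          rw [show pvStepA (cur_m, none, cur_num, prev_num, cand) r
              = (r, some true, cur_num + 1, prev_num, cand) from by simp [pvStepA, hrm, hgt]]
          rw [show pvStepB (some cur_m, pvDir none, cur_num, prev_num, cand + cur_num * (cur_num + 1) / 2 + (if prev_num ≤ cur_num then cur_num - prev_num + 1 else 0)) r
              = (some r, 1, cur_num + 1, prev_num,
                  cand + cur_num * (cur_num + 1) / 2 + (if prev_num ≤ cur_num then cur_num - prev_num + 1 else 0) + (cur_num + 1) + (if prev_num ≤ cur_num + 1 then 1 else 0)) from by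
            simp [pvStepB, pvDir, hrm, hgt]]
          rw [h1]
          have et : cand + (cur_num + 1) * (cur_num + 1 + 1) / 2 +
                (if prev_num ≤ cur_num + 1 then cur_num + 1 - prev_num + 1 else 0)
              = cand + cur_num * (cur_num + 1) / 2 + (if prev_num ≤ cur_num then cur_num - prev_num + 1 else 0) + (cur_num + 1) + (if prev_num ≤ cur_num + 1 then 1 else 0) := by
            have ht : cur_num + 1 + 1 = cur_num + 2 := by ring
            rw [ht, pv_tri_succ cur_num]
            generalize cur_num * (cur_num + 1) / 2 = t
            split_ifs <;> omega
          rw [et]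
        | some b => cases b with
          | true =>
          have h1 := ih r (some true) (cur_num + 1) prev_num cand (by omega)
          simp only [pvDir] at h1
          rw [show pvStepA (cur_m, (some true), cur_num, prev_num, cand) r
              = (r, some true, cur_num + 1, prev_num, cand) from by simp [pvStepA, hrm, hgt]]
          rw [show pvStepB (some cur_m, pvDir (some true), cur_num, prev_num, cand + cur_num * (cur_num + 1) / 2 + (if prev_num ≤ cur_num then cur_num - prev_num + 1 else 0)) r
              = (some r, 1, cur_num + 1, prev_num,
                  cand + cur_num * (cur_num + 1) / 2 + (if prev_num ≤ cur_num then cur_num - prev_num + 1 else 0) + (cur_num + 1) + (if prev_num ≤ cur_num + 1 then 1 else 0)) from by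
            simp [pvStepB, pvDir, hrm, hgt]]
          rw [h1]
          have et : cand + (cur_num + 1) * (cur_num + 1 + 1) / 2 +
                (if prev_num ≤ cur_num + 1 then cur_num + 1 - prev_num + 1 else 0)
              = cand + cur_num * (cur_num + 1) / 2 + (if prev_num ≤ cur_num then cur_num - prev_num + 1 else 0) + (cur_num + 1) + (if prev_num ≤ cur_num + 1 then 1 else 0) := by
            have ht : cur_num + 1 + 1 = cur_num + 2 := by ring
            rw [ht, pv_tri_succ cur_num]
            generalize cur_num * (cur_num + 1) / 2 = t
            split_ifs <;> omega
          rw [et]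
          | false =>
          have h1 := ih r none 1 cur_num (cand + (cur_num + 1) * cur_num / 2 + (if prev_num ≤ cur_num then cur_num - prev_num + 1 else 0)) (le_refl 1)
          simp only [pvDir] at h1
          rw [show pvStepA (cur_m, (some false), cur_num, prev_num, cand) r
              = (r, none, 1, cur_num, cand + (cur_num + 1) * cur_num / 2 + (if prev_num ≤ cur_num then cur_num - prev_num + 1 else 0)) from by simp [pvStepA, hrm, hgt]]
          rw [show pvStepB (some cur_m, pvDir (some false), cur_num, prev_num, cand + cur_num * (cur_num + 1) / 2 + (if prev_num ≤ cur_num then cur_num - prev_num + 1 else 0)) r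
              = (some r, 0, 1, cur_num, cand + cur_num * (cur_num + 1) / 2 + (if prev_num ≤ cur_num then cur_num - prev_num + 1 else 0) + 1 + (if cur_num ≤ 1 then 1 else 0)) from by
            simp [pvStepB, pvDir, hrm, hgt]]
          rw [h1]
          have et : cand + (cur_num + 1) * cur_num / 2 + (if prev_num ≤ cur_num then cur_num - prev_num + 1 else 0) + 1 * (1 + 1) / 2 + (if cur_num ≤ 1 then 1 - cur_num + 1 else 0)
              = cand + cur_num * (cur_num + 1) / 2 + (if prev_num ≤ cur_num then cur_num - prev_num + 1 else 0) + 1 + (if cur_num ≤ 1 then 1 else 0) := by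
            rw [mul_comm (cur_num + 1) cur_num]
            generalize cur_num * (cur_num + 1) / 2 = t
            split_ifs <;> omega
          rw [et]
      · -- strictly smaller: run extends unless the direction was 'increasing'
        have hngt : ¬ (r > cur_m) := hgt
        have hlt : r < cur_m := by omega
        cases inc with
        | none =>
          have h1 := ih r (some false) (cur_num + 1) prev_num cand (by omega)
          simp only [pvDir] at h1
          rw [show pvStepA (cur_m, none, cur_num, prev_num, cand) r
              = (r, some false, cur_num + 1, prev_num, cand) from by simp [pvStepA, hrm, hngt]]
          rw [show pvStepB (some cur_m, pvDir none, cur_num, prev_num, cand + cur_num * (cur_num + 1) / 2 + (if prev_num ≤ cur_num then cur_num - prev_num + 1 else 0)) r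
              = (some r, -1, cur_num + 1, prev_num,
                  cand + cur_num * (cur_num + 1) / 2 + (if prev_num ≤ cur_num then cur_num - prev_num + 1 else 0) + (cur_num + 1) + (if prev_num ≤ cur_num + 1 then 1 else 0)) from by
            simp [pvStepB, pvDir, hrm, hngt]]
          rw [h1]
          have et : cand + (cur_num + 1) * (cur_num + 1 + 1) / 2 +
                (if prev_num ≤ cur_num + 1 then cur_num + 1 - prev_num + 1 else 0)
              = cand + cur_num * (cur_num + 1) / 2 + (if prev_num ≤ cur_num then cur_num - prev_num + 1 else 0) + (cur_num + 1) + (if prev_num ≤ cur_num + 1 then 1 else 0) := by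
            have ht : cur_num + 1 + 1 = cur_num + 2 := by ring
            rw [ht, pv_tri_succ cur_num]
            generalize cur_num * (cur_num + 1) / 2 = t
            split_ifs <;> omega
          rw [et]
        | some b => cases b with
          | false =>
          have h1 := ih r (some false) (cur_num + 1) prev_num cand (by omega)
          simp only [pvDir] at h1
          rw [show pvStepA (cur_m, (some false), cur_num, prev_num, cand) r
              = (r, some false, cur_num + 1, prev_num, cand) from by simp [pvStepA, hrm, hngt]]
          rw [show pvStepB (some cur_m, pvDir (some false), cur_num, prev_num, cand + cur_num * (cur_num + 1) / 2 + (if prev_num ≤ cur_num then cur_num - prev_num + 1 else 0)) r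
              = (some r, -1, cur_num + 1, prev_num,
                  cand + cur_num * (cur_num + 1) / 2 + (if prev_num ≤ cur_num then cur_num - prev_num + 1 else 0) + (cur_num + 1) + (if prev_num ≤ cur_num + 1 then 1 else 0)) from by
            simp [pvStepB, pvDir, hrm, hngt]]
          rw [h1]
          have et : cand + (cur_num + 1) * (cur_num + 1 + 1) / 2 +
                (if prev_num ≤ cur_num + 1 then cur_num + 1 - prev_num + 1 else 0)
              = cand + cur_num * (cur_num + 1) / 2 + (if prev_num ≤ cur_num then cur_num - prev_num + 1 else 0) + (cur_num + 1) + (if prev_num ≤ cur_num + 1 then 1 else 0) := by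
            have ht : cur_num + 1 + 1 = cur_num + 2 := by ring
            rw [ht, pv_tri_succ cur_num]
            generalize cur_num * (cur_num + 1) / 2 = t
            split_ifs <;> omega
          rw [et]
          | true =>
          have h1 := ih r none 1 cur_num (cand + (cur_num + 1) * cur_num / 2 + (if prev_num ≤ cur_num then cur_num - prev_num + 1 else 0)) (le_refl 1)
          simp only [pvDir] at h1
          rw [show pvStepA (cur_m, (some true), cur_num, prev_num, cand) r
              = (r, none, 1, cur_num, cand + (cur_num + 1) * cur_num / 2 + (if prev_num ≤ cur_num then cur_num - prev_num + 1 else 0)) from by simp [pvStepA, hrm, hngt]]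
          rw [show pvStepB (some cur_m, pvDir (some true), cur_num, prev_num, cand + cur_num * (cur_num + 1) / 2 + (if prev_num ≤ cur_num then cur_num - prev_num + 1 else 0)) r
              = (some r, 0, 1, cur_num, cand + cur_num * (cur_num + 1) / 2 + (if prev_num ≤ cur_num then cur_num - prev_num + 1 else 0) + 1 + (if cur_num ≤ 1 then 1 else 0)) from by
            simp [pvStepB, pvDir, hrm, hngt]]
          rw [h1]
          have et : cand + (cur_num + 1) * cur_num / 2 + (if prev_num ≤ cur_num then cur_num - prev_num + 1 else 0) + 1 * (1 + 1) / 2 + (if cur_num ≤ 1 then 1 - cur_num + 1 else 0)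
              = cand + cur_num * (cur_num + 1) / 2 + (if prev_num ≤ cur_num then cur_num - prev_num + 1 else 0) + 1 + (if cur_num ≤ 1 then 1 else 0) := by
            rw [mul_comm (cur_num + 1) cur_num]
            generalize cur_num * (cur_num + 1) / 2 = t
            split_ifs <;> omega
          rw [et]

-- ===== VERDICT (by name: the statement is the Claim_ definition above) =====
theorem get_cand_spec : Claim_equal_get_cand := by
  intro n arr _ hpre
  unfold Spec_get_cand
  cases arr with
  | nil => exact absurd rfl hpre
  | cons a0 rest =>
    have h := pv_main rest a0 none 1 (((a0 :: rest).length : Int) + 1) 0 (le_refl 1)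
    simp only [pvDir] at h
    rw [show get_cand n (a0 :: rest)
        = pvFinA (rest.foldl pvStepA (a0, none, 1, ((a0 :: rest).length : Int) + 1, 0)) from rfl]
    rw [show get_cand_alt n (a0 :: rest)
        = (rest.foldl pvStepB (pvStepB (none, 0, 0, ((a0 :: rest).length : Int) + 1, 0) a0)).2.2.2.2 from rfl]
    rw [show pvStepB (none, 0, 0, ((a0 :: rest).length : Int) + 1, 0) a0
        = (some a0, 0, 1, ((a0 :: rest).length : Int) + 1,
            0 + 1 + (if (1 : Int) ≥ ((a0 :: rest).length : Int) + 1 then 1 else 0)) from rfl]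
    rw [h]
    have e : (0 : Int) + 1 * (1 + 1) / 2 +
        (if ((a0 :: rest).length : Int) + 1 ≤ 1 then 1 - (((a0 :: rest).length : Int) + 1) + 1 else 0)
        = 0 + 1 + (if (1 : Int) ≥ ((a0 :: rest).length : Int) + 1 then 1 else 0) := by
      simp only [List.length_cons, Nat.cast_add, Nat.cast_one]
      have hL : (0 : Int) ≤ (rest.length : Int) := Int.natCast_nonneg _
      split_ifs <;> omega
    rw [e]
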